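-- pv_equiv track=rewrite | github.com/JGPTech/Fun | DoQrack/synergy_refraction_qrack_stable.py | _phase_lock_to_target
-- ===== SOURCE A (Python) =====
-- from typing import List, Tuple, Dict
--
-- def _phase_lock_to_target(target_edges: List[int], labels_edges: List[int]) -> Tuple[int, List[int]]:
--     """
--     Choose the cyclic shift k that maximizes matches between target_edges and labels_edges.
--     Returns (best_shift_k, phase_aligned_target_edges).
--     """
--     n = len(target_edges)
--     best_k, best_match = 0, -1
--     for k in range(n):
--         # rotate target by k (to the right): t' [i] = target[(i - k) % n]
--         match = sum(1 for i in range(n) if target_edges[(i - k) % n] == labels_edges[i])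
--         if match > best_match:
--             best_match = match
--             best_k = k
--     # build aligned version once
--     aligned = [target_edges[(i - best_k) % n] for i in range(n)]
--     return best_k, aligned
-- ===== SOURCE B (Python) =====
-- from typing import List, Tuple
--
-- def _phase_lock_to_target(target_edges: List[int], labels_edges: List[int]) -> Tuple[int, List[int]]:
--     """Vote-counting version: each matching pair (i, j) votes for shift (i - j) % n."""
--     n = len(target_edges)
--     pos = {}
--     for j, v in enumerate(target_edges):
--         pos.setdefault(v, []).append(j)
--     votes = {}
--     for i in range(n):
--         for j in pos.get(labels_edges[i], []):
--             k = (i - j) % n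
--             votes[k] = votes.get(k, 0) + 1
--     best_k, best_match = 0, -1
--     for k in range(n):
--         m = votes.get(k, 0)
--         if m > best_match:
--             best_k, best_match = k, m
--     aligned = target_edges[n - best_k:] + target_edges[:n - best_k]
--     return best_k, aligned
-- ===== Notes on version B (the rewrite author's own statement) =====
-- stated objective: alternative
-- what changed: Instead of rescoring every cyclic shift with an inner scan, B groups target indices by value once and lets each matching pair (i,j) vote for shift (i-j)%n into a counter, then takes the first argmax and builds the aligned list by slicing; cost is O(n + P) for P equal-value pairs, which trades the uniform O(n^2) scan for pair-proportional work (near-linear on distinct-valued data, comparable on duplicate-heavy data).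
import Mathlib
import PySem

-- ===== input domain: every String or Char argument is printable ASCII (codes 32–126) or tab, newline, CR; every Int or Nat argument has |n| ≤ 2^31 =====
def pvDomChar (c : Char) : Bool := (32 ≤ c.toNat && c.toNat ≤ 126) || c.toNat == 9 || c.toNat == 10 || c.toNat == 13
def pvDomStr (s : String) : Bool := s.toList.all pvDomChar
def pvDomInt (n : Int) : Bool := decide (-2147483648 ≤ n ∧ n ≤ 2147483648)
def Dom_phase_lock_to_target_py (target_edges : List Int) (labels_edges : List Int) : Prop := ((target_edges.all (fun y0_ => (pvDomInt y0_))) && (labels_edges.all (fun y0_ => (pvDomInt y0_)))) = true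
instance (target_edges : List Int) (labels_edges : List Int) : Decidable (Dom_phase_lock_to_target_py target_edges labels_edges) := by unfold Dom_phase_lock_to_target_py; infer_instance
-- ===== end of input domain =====

-- B changes the algorithm: instead of rescoring every shift with an inner scan, it groups target
-- indices by value once and votes shift (i-j)%n per matching pair, then takes the first argmax.

-- ===== PORT A =====
-- match = sum(1 for i in range(n) if target_edges[(i-k)%n] == labels_edges[i])
def pvMatchA (t l : List Int) (n k : Int) : Int :=
  ((PySem.List.pyRange 0 n).map (fun i =>
    if PySem.List.pyGetD t (PySem.Int.mod (i - k) n) 0 = PySem.List.pyGetD l i 0 then (1 : Int) else 0)).sum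

def phase_lock_to_target_py (target_edges : List Int) (labels_edges : List Int) : Int × List Int :=
  let n : Int := target_edges.length
  let best := (PySem.List.pyRange 0 n).foldl
    (fun (st : Int × Int) k =>
      if pvMatchA target_edges labels_edges n k > st.2
      then (k, pvMatchA target_edges labels_edges n k) else st) (0, -1)
  (best.1, (PySem.List.pyRange 0 n).map (fun i =>
    PySem.List.pyGetD target_edges (PySem.Int.mod (i - best.1) n) 0))

-- ===== PORT B =====
-- pos: for j, v in enumerate(target_edges): pos.setdefault(v, []).append(j)
def pvPos (t : List Int) : PySem.Dict Int (List Int) :=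
  (PySem.List.enumerate t).foldl (fun d p => d.modify p.2 [] (· ++ [p.1])) PySem.Dict.empty

-- votes: for i in range(n): for j in pos.get(l[i], []): votes[(i-j)%n] = votes.get((i-j)%n, 0) + 1
def pvVotes (t l : List Int) (n : Int) : PySem.Dict Int Int :=
  (PySem.List.pyRange 0 n).foldl
    (fun d i => ((pvPos t).getD (PySem.List.pyGetD l i 0) []).foldl
      (fun d2 j => d2.insert (PySem.Int.mod (i - j) n) (d2.getD (PySem.Int.mod (i - j) n) 0 + 1)) d)
    PySem.Dict.empty

def phase_lock_to_target_py_alt (target_edges : List Int) (labels_edges : List Int) : Int × List Int :=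
  let n : Int := target_edges.length
  let votes := pvVotes target_edges labels_edges n
  let best := (PySem.List.pyRange 0 n).foldl
    (fun (st : Int × Int) k =>
      if votes.getD k 0 > st.2 then (k, votes.getD k 0) else st) (0, -1)
  (best.1,
    PySem.List.slice target_edges (some (n - best.1)) none
      ++ PySem.List.slice target_edges none (some (n - best.1)))

-- ===== PRECONDITION & SPEC =====
-- Pre_ excludes exactly the inputs on which A raises IndexError: labels_edges shorter than target_edges.
def Pre_phase_lock_to_target_py (target_edges : List Int) (labels_edges : List Int) : Prop :=
  target_edges.length ≤ labels_edges.length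
instance (target_edges : List Int) (labels_edges : List Int) : Decidable (Pre_phase_lock_to_target_py target_edges labels_edges) := by unfold Pre_phase_lock_to_target_py; infer_instance

def pvWitness_phase_lock_to_target_py : List Int × List Int := ([1, 2, 1], [2, 1, 1])

def Spec_phase_lock_to_target_py (target_edges : List Int) (labels_edges : List Int) (out : Int × List Int) : Prop := out = phase_lock_to_target_py_alt target_edges labels_edges
instance (target_edges : List Int) (labels_edges : List Int) (out : Int × List Int) : Decidable (Spec_phase_lock_to_target_py target_edges labels_edges out) := by unfold Spec_phase_lock_to_target_py; infer_instance

-- ===== CLAIM (what is proved, stated in full; the proofs are below) =====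
def Claim_equal_phase_lock_to_target_py : Prop := ∀ (target_edges : List Int) (labels_edges : List Int), Dom_phase_lock_to_target_py target_edges labels_edges → Pre_phase_lock_to_target_py target_edges labels_edges → Spec_phase_lock_to_target_py target_edges labels_edges (phase_lock_to_target_py target_edges labels_edges)

-- ===== LEMMAS AND PROOFS =====

-- shifting by j and by k are inverse modulo n on [0, n)
theorem pv_mod_iff (n i j k : Int) (hn : 0 < n) (hj1 : 0 ≤ j) (hj2 : j < n)
    (hk1 : 0 ≤ k) (hk2 : k < n) :
    PySem.Int.mod (i - j) n = k ↔ j = PySem.Int.mod (i - k) n := by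
  rw [PySem.Int.mod_eq_emod_of_pos hn, PySem.Int.mod_eq_emod_of_pos hn]
  have hkk : k % n = k := Int.emod_eq_of_lt hk1 hk2
  have hjj : j % n = j := Int.emod_eq_of_lt hj1 hj2
  constructor
  · intro h
    have h1 : (i - j) % n = k % n := by rw [hkk]; exact h
    obtain ⟨c, hc⟩ := Int.dvd_of_emod_eq_zero (Int.emod_eq_emod_iff_emod_sub_eq_zero.mp h1)
    have h2 : j % n = (i - k) % n := by
      refine Int.emod_eq_emod_iff_emod_sub_eq_zero.mpr (Int.emod_eq_zero_of_dvd ⟨-c, ?_⟩)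
      linarith
    rw [← h2, hjj]
  · intro h
    subst h
    have h3 : (i - (i - k) % n) % n = (i - (i - k)) % n := by
      conv_lhs => rw [Int.sub_emod, Int.emod_emod_of_dvd _ dvd_rfl, ← Int.sub_emod]
    rw [h3, show i - (i - k) = k by ring, hkk]

theorem pv_mod_beq (n i j k : Int) (hn : 0 < n) (hj1 : 0 ≤ j) (hj2 : j < n)
    (hk1 : 0 ≤ k) (hk2 : k < n) :
    (PySem.Int.mod (i - j) n == k) = (j == PySem.Int.mod (i - k) n) := by
  rw [Bool.eq_iff_iff]
  simp only [beq_iff_eq]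
  exact pv_mod_iff n i j k hn hj1 hj2 hk1 hk2

-- pos maps each value to the list of its indices in target
theorem pv_pos_getD (t : List Int) (v : Int) :
    (pvPos t).getD v [] =
      (PySem.List.pyRange 0 (t.length : Int)).filter (fun j => PySem.List.pyGetD t j 0 == v) := by
  unfold pvPos
  have hswap : ∀ (L : List (Int × Int)) (d : PySem.Dict Int (List Int)),
      L.foldl (fun d p => d.modify p.2 [] (· ++ [p.1])) d
        = (L.map Prod.swap).foldl (fun d p => d.modify p.1 [] (· ++ [p.2])) d := by
    intro L d; rw [List.foldl_map]; simp [Prod.swap]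
  rw [hswap, PySem.Dict.getD_foldl_modify_append, PySem.List.enumerate_eq_map_pyRange t 0]
  simp [List.map_map, List.filter_map, PySem.Dict.getD_empty, PySem.List.len_eq,
    Function.comp_def, Prod.swap]

-- generic nested counting fold
theorem pv_getD_fold_insert_add (L : List Int) (g : Int → List Int) (f : Int → Int → Int)
    (d : PySem.Dict Int Int) (k : Int) :
    (L.foldl (fun d i => (g i).foldl
        (fun d2 j => d2.insert (f i j) (d2.getD (f i j) 0 + 1)) d) d).getD k 0
      = d.getD k 0 + ((L.map (fun i => (((g i).map (f i)).count k : Int))).sum) := by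
  induction L generalizing d with
  | nil => simp
  | cons i L ih =>
    rw [List.foldl_cons, ih]
    have hstep : ((g i).foldl (fun d2 j => d2.insert (f i j) (d2.getD (f i j) 0 + 1)) d).getD k 0
        = d.getD k 0 + (((g i).map (f i)).count k : Int) := by
      have h1 : (g i).foldl (fun d2 j => d2.insert (f i j) (d2.getD (f i j) 0 + 1)) d
          = ((g i).map (f i)).foldl (fun d2 x => d2.insert x (d2.getD x 0 + 1)) d := by
        rw [List.foldl_map]
      rw [h1, PySem.Dict.getD_foldl_insert_add_one]
    rw [hstep]
    simp [List.map_cons, List.sum_cons]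
    ring

-- one row of votes: the indices of labels[i]'s value in target, shifted, contain k
-- exactly when target[(i-k)%n] == labels[i]
theorem pv_count_i (t : List Int) (i k v : Int) (hn : 0 < (t.length : Int))
    (hk1 : 0 ≤ k) (hk2 : k < (t.length : Int)) :
    (((pvPos t).getD v []).map (fun j => PySem.Int.mod (i - j) (t.length : Int))).count k
      = if PySem.List.pyGetD t (PySem.Int.mod (i - k) (t.length : Int)) 0 = v then 1 else 0 := by
  set n : Int := (t.length : Int) with hndef
  set j0 : Int := PySem.Int.mod (i - k) n with hj0def
  have hj01 : 0 ≤ j0 := PySem.Int.mod_nonneg _ hn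
  have hj02 : j0 < n := PySem.Int.mod_lt _ hn
  rw [pv_pos_getD, List.count_eq_countP, List.countP_map, List.countP_filter]
  have hcong : (PySem.List.pyRange 0 n).countP
      (fun j => ((fun x => x == k) ∘ fun j => PySem.Int.mod (i - j) n) j
        && (PySem.List.pyGetD t j 0 == v))
      = (PySem.List.pyRange 0 n).countP (fun j => (j == j0) && (PySem.List.pyGetD t j0 0 == v)) := by
    refine List.countP_congr ?_
    intro x hx
    obtain ⟨hx1, hx2⟩ := PySem.List.mem_pyRange_one.mp hx
    simp only [Function.comp]
    rw [pv_mod_beq n i x k hn hx1 hx2 hk1 hk2, ← hj0def]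
    by_cases hxx : x = j0
    · subst hxx; simp
    · simp [hxx]
  rw [hcong]
  by_cases hp : PySem.List.pyGetD t j0 0 = v
  · simp only [hp, beq_self_eq_true, Bool.and_true]
    rw [← List.count_eq_countP, List.count_eq_one_of_mem (PySem.List.nodup_pyRange_one 0 n)
      (PySem.List.mem_pyRange_one.mpr ⟨hj01, hj02⟩)]
    simp
  · simp [hp]

-- votes[k] equals A's match count for shift k
theorem pv_votes_eq_match (t l : List Int) (k : Int) (hn : 0 < (t.length : Int))
    (hk1 : 0 ≤ k) (hk2 : k < (t.length : Int)) :
    (pvVotes t l (t.length : Int)).getD k 0 = pvMatchA t l (t.length : Int) k := by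
  unfold pvVotes pvMatchA
  rw [pv_getD_fold_insert_add _ (fun i => (pvPos t).getD (PySem.List.pyGetD l i 0) [])
    (fun i j => PySem.Int.mod (i - j) (t.length : Int)) _ k]
  rw [PySem.Dict.getD_empty, zero_add]
  congr 1
  refine List.map_congr_left ?_
  intro i _
  rw [pv_count_i t i k (PySem.List.pyGetD l i 0) hn hk1 hk2]
  split <;> simp

-- the argmax fold keeps its first component inside [0, n)
theorem pv_fold_bounds (n : Int) (g : Int → Int) (L : List Int)
    (hL : ∀ x ∈ L, 0 ≤ x ∧ x < n) (st : Int × Int) (hst : 0 ≤ st.1 ∧ st.1 < n) :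
    0 ≤ (L.foldl (fun st k => if g k > st.2 then (k, g k) else st) st).1 ∧
      (L.foldl (fun st k => if g k > st.2 then (k, g k) else st) st).1 < n := by
  induction L generalizing st with
  | nil => simpa using hst
  | cons a L ih =>
    rw [List.foldl_cons]
    refine ih (fun x hx => hL x (List.mem_cons_of_mem _ hx)) _ ?_
    split
    · exact hL a List.mem_cons_self
    · exact hst

-- B's slice rotation equals A's index-wise rotation
theorem pv_slice_rot (t : List Int) (bk : Int) (h1 : 0 ≤ bk) (h2 : bk < (t.length : Int)) :
    PySem.List.slice t (some ((t.length : Int) - bk)) none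
        ++ PySem.List.slice t none (some ((t.length : Int) - bk))
      = (PySem.List.pyRange 0 (t.length : Int)).map
          (fun i => PySem.List.pyGetD t (PySem.Int.mod (i - bk) (t.length : Int)) 0) := by
  have hn : (0:Int) < (t.length : Int) := by omega
  have hm : ((t.length : Int) - bk) = ((t.length - bk.toNat : Nat) : Int) := by omega
  rw [hm, PySem.List.slice_from_natCast, PySem.List.slice_to_natCast]
  rw [← List.rotate_eq_drop_append_take (by omega : t.length - bk.toNat ≤ t.length)]
  refine List.ext_getElem ?_ ?_
  · simp [PySem.List.length_pyRange_one]
  · intro idx hA hB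
    have hidx : idx < t.length := by simpa using hA
    rw [List.getElem_rotate, List.getElem_map, PySem.List.getElem_pyRange_one]
    have hj1 : 0 ≤ PySem.Int.mod ((0 + (idx:Int)) - bk) (t.length : Int) := PySem.Int.mod_nonneg _ hn
    have hj2 : PySem.Int.mod ((0 + (idx:Int)) - bk) (t.length : Int) < (t.length : Int) :=
      PySem.Int.mod_lt _ hn
    rw [PySem.List.pyGetD_eq_getElem t 0 hj1 hj2]
    congr 1
    have hstep : PySem.Int.mod ((0 + (idx:Int)) - bk) (t.length : Int)
        = (((idx + (t.length - bk.toNat)) % t.length : Nat) : Int) := by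
      rw [PySem.Int.mod_eq_emod_of_pos hn]
      have e1 : (0 + (idx:Int)) - bk = (idx:Int) - bk := by ring
      rw [e1, Int.emod_eq_add_self_emod]
      have e2 : (idx:Int) - bk + (t.length:Int) = ((idx + (t.length - bk.toNat) : Nat) : Int) := by
        push_cast; omega
      rw [e2, ← Int.natCast_emod]
    rw [hstep, Int.toNat_natCast]

-- ===== VERDICT (by name: the statement is the Claim_ definition above) =====
theorem phase_lock_to_target_py_spec : Claim_equal_phase_lock_to_target_py := by
  intro t l _hdom _hpre
  unfold Spec_phase_lock_to_target_py phase_lock_to_target_py phase_lock_to_target_py_alt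
  by_cases ht : t = []
  · subst ht
    simp [PySem.List.pyRange_one_eq_nil le_rfl, PySem.List.slice]
  · have hn : (0 : Int) < (t.length : Int) := by
      have := List.length_pos_iff.mpr ht
      exact_mod_cast this
    have hfold :
        (PySem.List.pyRange 0 (t.length : Int)).foldl
          (fun (st : Int × Int) k =>
            if pvMatchA t l (t.length : Int) k > st.2
            then (k, pvMatchA t l (t.length : Int) k) else st) (0, -1)
        = (PySem.List.pyRange 0 (t.length : Int)).foldl
          (fun (st : Int × Int) k =>
            if (pvVotes t l (t.length : Int)).getD k 0 > st.2
            then (k, (pvVotes t l (t.length : Int)).getD k 0) else st) (0, -1) := by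
      refine PySem.List.foldl_congr_mem _ _ _ _ ?_
      intro acc x hx
      obtain ⟨hx1, hx2⟩ := PySem.List.mem_pyRange_one.mp hx
      rw [pv_votes_eq_match t l x hn hx1 hx2]
    dsimp only
    rw [hfold]
    set best := (PySem.List.pyRange 0 (t.length : Int)).foldl
      (fun (st : Int × Int) k =>
        if (pvVotes t l (t.length : Int)).getD k 0 > st.2
        then (k, (pvVotes t l (t.length : Int)).getD k 0) else st) ((0 : Int), (-1 : Int)) with hbest
    have hb : 0 ≤ best.1 ∧ best.1 < (t.length : Int) := by
      rw [hbest]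
      refine pv_fold_bounds _ _ _ ?_ _ ⟨le_refl 0, hn⟩
      intro x hx; exact PySem.List.mem_pyRange_one.mp hx
    exact Prod.ext rfl (pv_slice_rot t best.1 hb.1 hb.2).symm
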